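-- pv_equiv track=rewrite | github.com/Semih1997/CodingBat-Java-Problems-in-Python | CodingBat Java Recorsion-1/QcountHi2.py | countHi2
-- ===== SOURCE A (Python) =====
-- def countHi2(a):
--     if len(a) <= 1:
--         return 0
--     elif a[0:2] == "hi":
--         return 1 + countHi2(a[1:])
--     elif a[0] == "x":
--         return countHi2(a[2:])
--     else:
--         return countHi2(a[1:])
-- ===== SOURCE B (Python) =====
-- def countHi2(a):
--     n = len(a)
--     i = 0
--     count = 0
--     while i < n - 1:
--         if a[i] == 'h' and a[i + 1] == 'i':
--             count += 1
--             i += 1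
--         elif a[i] == 'x':
--             i += 2
--         else:
--             i += 1
--     return count
-- ===== Notes on version B (the rewrite author's own statement) =====
-- stated objective: faster
-- what changed: Replaces A's recursion on string slices (each slice copies the suffix) with a single iterative index-pointer pass applying the same advance rules, so no substrings are ever built.
import Mathlib
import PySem

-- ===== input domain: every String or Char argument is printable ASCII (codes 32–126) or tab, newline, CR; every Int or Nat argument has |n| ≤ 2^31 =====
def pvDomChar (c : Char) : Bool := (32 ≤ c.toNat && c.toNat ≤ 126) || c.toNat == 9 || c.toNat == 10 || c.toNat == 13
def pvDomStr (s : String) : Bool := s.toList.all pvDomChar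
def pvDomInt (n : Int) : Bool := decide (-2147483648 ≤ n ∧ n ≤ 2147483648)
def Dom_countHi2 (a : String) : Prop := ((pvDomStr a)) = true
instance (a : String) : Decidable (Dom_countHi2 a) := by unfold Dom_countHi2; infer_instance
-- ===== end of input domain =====

-- B replaces A's recursion on copied string slices with one iterative index pass (same skip rules); faster by avoiding slice copies.

-- ===== PORT A =====
-- A's recursion, on the code-point list; slices a[0:2], a[1:], a[2:] ported via PySem.List.slice.
def countHi2Go (l : List Char) : Int :=
  if l.length ≤ 1 then 0
  else if PySem.List.slice l (some 0) (some 2) = ['h', 'i'] then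
    1 + countHi2Go (PySem.List.slice l (some 1) none)
  else if PySem.List.pyGet? l 0 = some 'x' then
    countHi2Go (PySem.List.slice l (some 2) none)
  else
    countHi2Go (PySem.List.slice l (some 1) none)
termination_by l.length
decreasing_by
  all_goals simp [pysem]; omega

def countHi2 (a : String) : Int := countHi2Go a.toList

-- ===== PORT B =====
-- B's while loop: index pointer i, running count.
def countHi2AltGo (cs : List Char) (i : Nat) (count : Int) : Int :=
  if i + 1 < cs.length then
    if cs[i]? = some 'h' ∧ cs[i + 1]? = some 'i' then
      countHi2AltGo cs (i + 1) (count + 1)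
    else if cs[i]? = some 'x' then
      countHi2AltGo cs (i + 2) count
    else
      countHi2AltGo cs (i + 1) count
  else count
termination_by cs.length - i

def countHi2_alt (a : String) : Int := countHi2AltGo a.toList 0 0

-- ===== PRECONDITION & SPEC =====
def Spec_countHi2 (a : String) (out : Int) : Prop := out = countHi2_alt a
instance (a : String) (out : Int) : Decidable (Spec_countHi2 a out) := by unfold Spec_countHi2; infer_instance

-- ===== CLAIM (what is proved, stated in full; the proofs are below) =====
def Claim_equal_countHi2 : Prop := ∀ (a : String), Dom_countHi2 a → Spec_countHi2 a (countHi2 a)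

-- ===== LEMMAS AND PROOFS =====

-- The loop at position i equals count plus A's recursion on the suffix from i.
theorem countHi2AltGo_eq (cs : List Char) (i : Nat) (count : Int) :
    countHi2AltGo cs i count = count + countHi2Go (cs.drop i) := by
  by_cases h : i + 1 < cs.length
  · have hlen : ¬ (cs.drop i).length ≤ 1 := by simp [List.length_drop]; omega
    have hi : (cs.drop i)[0]? = cs[i]? := by
      simp [List.getElem?_drop]
    have hi1 : (cs.drop i)[1]? = cs[i + 1]? := by
      simp [List.getElem?_drop]
    have hslice2 : PySem.List.slice (cs.drop i) (some 0) (some 2) = (cs.drop i).take 2 := by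
      simpa using PySem.List.slice_natCast (cs.drop i) 0 2
    have htake : (cs.drop i).take 2 = ['h', 'i'] ↔ (cs[i]? = some 'h' ∧ cs[i + 1]? = some 'i') := by
      constructor
      · intro ht
        have h0 : (cs.drop i)[0]? = some 'h' := by
          have := congrArg (fun l => l[0]?) ht
          simpa [List.getElem?_take] using this
        have h1 : (cs.drop i)[1]? = some 'i' := by
          have := congrArg (fun l => l[1]?) ht
          simpa [List.getElem?_take] using this
        exact ⟨hi ▸ h0, hi1 ▸ h1⟩
      · intro ⟨h0, h1⟩
        have hl2 : 2 ≤ (cs.drop i).length := by simp [List.length_drop]; omega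
        apply List.ext_getElem?
        intro n
        match n with
        | 0 => simp [hi, h0]
        | 1 => simp [hi1, h1]
        | (n+2) => simp
    have hget0 : PySem.List.pyGet? (cs.drop i) 0 = cs[i]? := by
      simp [pysem, List.getElem?_drop]
    have hdrop1 : PySem.List.slice (cs.drop i) (some 1) none = cs.drop (i + 1) := by
      simp [pysem, List.drop_drop]
    have hdrop2 : PySem.List.slice (cs.drop i) (some 2) none = cs.drop (i + 2) := by
      simp [pysem, List.drop_drop]
    rw [countHi2AltGo, countHi2Go]
    simp only [hlen, if_false, if_pos h, hslice2, hget0, hdrop1, hdrop2]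
    by_cases hhi : cs[i]? = some 'h' ∧ cs[i + 1]? = some 'i'
    · rw [if_pos hhi, if_pos (htake.mpr hhi), countHi2AltGo_eq cs (i + 1) (count + 1)]
      ring
    · rw [if_neg hhi, if_neg (fun ht => hhi (htake.mp ht))]
      by_cases hx : cs[i]? = some 'x'
      · rw [if_pos hx, if_pos hx, countHi2AltGo_eq cs (i + 2) count]
      · rw [if_neg hx, if_neg hx, countHi2AltGo_eq cs (i + 1) count]
  · have hlen : (cs.drop i).length ≤ 1 := by simp [List.length_drop]; omega
    rw [countHi2AltGo, countHi2Go]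
    rw [if_neg h, if_pos hlen]
    ring
termination_by cs.length - i

-- ===== VERDICT (by name: the statement is the Claim_ definition above) =====
theorem countHi2_spec : Claim_equal_countHi2 := by
  intro a _
  unfold Spec_countHi2 countHi2 countHi2_alt
  rw [countHi2AltGo_eq]
  simp
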